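-- pv_equiv track=rewrite | github.com/francisco-perez-sorrosal/ai-assistants-cfg | scripts/project_metrics/collectors/scc_collector.py | _rebuild_language_breakdown
-- ===== SOURCE A (Python) =====
-- def _rebuild_language_breakdown(
--     per_file_sloc: dict[str, int],
--     per_file_language: dict[str, str],
-- ) -> dict[str, dict[str, int]]:
--     """Sum per-language ``sloc`` and ``file_count`` from the filtered file set.
--
--     Languages whose every file was excluded drop out of the breakdown
--     entirely — ``language_count`` therefore reflects languages that
--     survived filtering, not what scc originally reported.
--     """
--
--     breakdown: dict[str, dict[str, int]] = {}
--     for filename, sloc in per_file_sloc.items():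
--         language = per_file_language.get(filename)
--         if not language:
--             continue
--         entry = breakdown.setdefault(language, {"sloc": 0, "file_count": 0})
--         entry["sloc"] += sloc
--         entry["file_count"] += 1
--     return breakdown
-- ===== SOURCE B (Python) =====
-- def _rebuild_language_breakdown(
--     per_file_sloc: dict[str, int],
--     per_file_language: dict[str, str],
-- ) -> dict[str, dict[str, int]]:
--     # Pass 1: group the sloc values by language (falsy language -> skipped).
--     groups: dict[str, list[int]] = {}
--     for filename, sloc in per_file_sloc.items():
--         language = per_file_language.get(filename)
--         if not language:
--             continue
--         groups.setdefault(language, []).append(sloc)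
--     # Pass 2: aggregate each group into its breakdown entry.
--     return {
--         language: {"sloc": sum(slocs), "file_count": len(slocs)}
--         for language, slocs in groups.items()
--     }
-- ===== Notes on version B (the rewrite author's own statement) =====
-- stated objective: alternative
-- what changed: Replaces the single accumulating pass that mutates per-language counter dicts in place with a two-phase decomposition: first group sloc values into a dict of lists per language, then build each {'sloc','file_count'} entry from sum and len of its group.
import Mathlib
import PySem

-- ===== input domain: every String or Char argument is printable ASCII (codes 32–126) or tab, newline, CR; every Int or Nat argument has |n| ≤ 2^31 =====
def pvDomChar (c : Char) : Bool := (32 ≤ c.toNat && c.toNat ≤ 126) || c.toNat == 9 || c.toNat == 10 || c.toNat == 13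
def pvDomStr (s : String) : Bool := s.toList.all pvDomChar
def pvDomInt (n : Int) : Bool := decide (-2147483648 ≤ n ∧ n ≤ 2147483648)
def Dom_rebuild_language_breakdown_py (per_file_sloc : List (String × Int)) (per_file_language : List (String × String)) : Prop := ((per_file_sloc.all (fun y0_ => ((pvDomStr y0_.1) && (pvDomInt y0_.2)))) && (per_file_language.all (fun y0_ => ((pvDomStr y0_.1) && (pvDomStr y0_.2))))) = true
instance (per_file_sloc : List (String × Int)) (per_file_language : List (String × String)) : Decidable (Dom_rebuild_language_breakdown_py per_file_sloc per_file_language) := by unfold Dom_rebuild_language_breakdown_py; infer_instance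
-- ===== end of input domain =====

-- B replaces A's single in-place-accumulating pass with a two-phase decomposition
-- (group sloc values per language, then aggregate each group with sum/len); same cost, alternative structure.

-- ===== PORT A =====
def rebuild_language_breakdown_py (per_file_sloc : List (String × Int)) (per_file_language : List (String × String)) : List (String × List (String × Int)) :=
  -- breakdown = {}; for filename, sloc in per_file_sloc.items(): ...
  (((PySem.Dict.ofList per_file_sloc).items.foldl (fun b p =>
      match (PySem.Dict.ofList per_file_language).get? p.1 with
      | none => b
      | some language =>
        if language = "" then b
        else
          -- entry = breakdown.setdefault(language, {"sloc": 0, "file_count": 0});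
          -- entry["sloc"] += sloc; entry["file_count"] += 1
          ((b.setdefault language (PySem.Dict.ofList [("sloc", (0 : Int)), ("file_count", (0 : Int))])).modify
              language PySem.Dict.empty (fun e => e.modify "sloc" 0 (· + p.2))).modify
            language PySem.Dict.empty (fun e => e.modify "file_count" 0 (· + 1)))
      PySem.Dict.empty) : PySem.Dict String (PySem.Dict String Int)).items.map (fun q => (q.1, q.2.items))

-- ===== PORT B =====
def rebuild_language_breakdown_py_alt (per_file_sloc : List (String × Int)) (per_file_language : List (String × String)) : List (String × List (String × Int)) :=
  -- Pass 1: groups.setdefault(language, []).append(sloc)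
  ((((PySem.Dict.ofList per_file_sloc).items.foldl (fun g p =>
      match (PySem.Dict.ofList per_file_language).get? p.1 with
      | none => g
      | some language =>
        if language = "" then g
        else g.modify language [] (· ++ [p.2]))
      PySem.Dict.empty) : PySem.Dict String (List Int)).items.map
  -- Pass 2: {language: {"sloc": sum(slocs), "file_count": len(slocs)}}
    (fun q => (q.1, [("sloc", q.2.sum), ("file_count", (q.2.length : Int))])))

-- ===== PRECONDITION & SPEC =====
def Spec_rebuild_language_breakdown_py (per_file_sloc : List (String × Int)) (per_file_language : List (String × String)) (out : List (String × List (String × Int))) : Prop := out = rebuild_language_breakdown_py_alt per_file_sloc per_file_language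
instance (per_file_sloc : List (String × Int)) (per_file_language : List (String × String)) (out : List (String × List (String × Int))) : Decidable (Spec_rebuild_language_breakdown_py per_file_sloc per_file_language out) := by unfold Spec_rebuild_language_breakdown_py; infer_instance

-- ===== CLAIM (what is proved, stated in full; the proofs are below) =====
def Claim_equal_rebuild_language_breakdown_py : Prop := ∀ (per_file_sloc : List (String × Int)) (per_file_language : List (String × String)), Dom_rebuild_language_breakdown_py per_file_sloc per_file_language → Spec_rebuild_language_breakdown_py per_file_sloc per_file_language (rebuild_language_breakdown_py per_file_sloc per_file_language)

-- ===== LEMMAS AND PROOFS =====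

-- The breakdown entry that a group of sloc values denotes.
def pvEntry (xs : List Int) : PySem.Dict String Int :=
  PySem.Dict.mk [("sloc", xs.sum), ("file_count", (xs.length : Int))]

-- Map B's dict of groups to A's dict of entry dicts.
def pvF (g : PySem.Dict String (List Int)) : PySem.Dict String (PySem.Dict String Int) :=
  PySem.Dict.mk (g.items.map (fun q => (q.1, pvEntry q.2)))

-- The (language, sloc) pairs that survive the falsy-language skip, in order.
def pvRel (lang : PySem.Dict String String) (l : List (String × Int)) : List (String × Int) :=
  l.filterMap (fun p => match lang.get? p.1 with
    | none => none
    | some language => if language = "" then none else some (language, p.2))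

theorem pvF_contains (g : PySem.Dict String (List Int)) (k : String) :
    (pvF g).contains k = g.contains k := by
  cases g with
  | mk L => simp [pvF, PySem.Dict.contains, List.any_map, Function.comp_def]

theorem pvF_get? (g : PySem.Dict String (List Int)) (k : String) :
    (pvF g).get? k = (g.get? k).map pvEntry := by
  cases g with
  | mk L =>
    simp [pvF, PySem.Dict.get?, List.find?_map, Option.map_map, Function.comp_def]

theorem pvF_insert (g : PySem.Dict String (List Int)) (k : String) (v : List Int) :
    pvF (g.insert k v) = (pvF g).insert k (pvEntry v) := by
  simp only [PySem.Dict.insert, pvF_contains]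
  by_cases h : g.contains k = true
  · simp only [h, if_pos, pvF, List.map_map]
    congr 1
    apply List.map_congr_left
    intro p _
    by_cases hp : (p.1 == k) = true <;> simp [hp, Function.comp]
  · simp [h, pvF]

theorem pvEntry_step (xs : List Int) (s : Int) :
    ((pvEntry xs).modify "sloc" 0 (· + s)).modify "file_count" 0 (· + 1)
      = pvEntry (xs ++ [s]) := by
  have h : ∀ (a c : Int),
      ((PySem.Dict.mk [("sloc", a), ("file_count", c)]).modify "sloc" 0 (· + s)).modify
          "file_count" 0 (· + 1)
        = PySem.Dict.mk [("sloc", a + s), ("file_count", c + 1)] := fun a c => rfl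
  rw [pvEntry, h]
  simp [pvEntry]

theorem insert_setdefault_self (d : PySem.Dict String (PySem.Dict String Int))
    (k : String) (v w : PySem.Dict String Int) :
    (d.setdefault k v).insert k w = d.insert k w := by
  by_cases h : d.contains k = true
  · simp [PySem.Dict.setdefault, h]
  · have h' : d.contains k = false := by simpa using h
    have e : d.setdefault k v = d.insert k v := by
      simp [PySem.Dict.setdefault, PySem.Dict.insert, h']
    rw [e, PySem.Dict.insert_insert_self]

theorem step_main (g : PySem.Dict String (List Int)) (key : String) (s : Int) :
    (((pvF g).setdefault key (PySem.Dict.ofList [("sloc", (0 : Int)), ("file_count", (0 : Int))])).modify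
        key PySem.Dict.empty (fun e => e.modify "sloc" 0 (· + s))).modify
      key PySem.Dict.empty (fun e => e.modify "file_count" 0 (· + 1))
      = pvF (g.modify key [] (· ++ [s])) := by
  have hmod : ∀ (d : PySem.Dict String (PySem.Dict String Int)) (f : PySem.Dict String Int → PySem.Dict String Int),
      d.modify key PySem.Dict.empty f = d.insert key (f (d.getD key PySem.Dict.empty)) :=
    fun d f => rfl
  have hE : ((pvF g).setdefault key (PySem.Dict.ofList [("sloc", (0 : Int)), ("file_count", (0 : Int))])).getD key PySem.Dict.empty
      = (g.get? key).elim (pvEntry []) pvEntry := by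
    rw [PySem.Dict.getD_eq_get?_getD, PySem.Dict.get?_setdefault_self, pvF_get?]
    cases g.get? key <;> rfl
  have hRHS : g.modify key [] (· ++ [s]) = g.insert key (g.getD key [] ++ [s]) := rfl
  rw [hmod, hmod, PySem.Dict.getD_insert_self, insert_setdefault_self,
      PySem.Dict.insert_insert_self, hE, hRHS, pvF_insert]
  congr 1
  cases hk : g.get? key with
  | none =>
    rw [PySem.Dict.getD_eq_get?_getD, hk]
    simp only [Option.elim, Option.getD]
    exact pvEntry_step [] s
  | some xs =>
    rw [PySem.Dict.getD_eq_get?_getD, hk]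
    simp only [Option.elim, Option.getD]
    exact pvEntry_step xs s

theorem fold_main (r : List (String × Int)) (g : PySem.Dict String (List Int)) :
    r.foldl (fun b q =>
        ((b.setdefault q.1 (PySem.Dict.ofList [("sloc", (0 : Int)), ("file_count", (0 : Int))])).modify
            q.1 PySem.Dict.empty (fun e => e.modify "sloc" 0 (· + q.2))).modify
          q.1 PySem.Dict.empty (fun e => e.modify "file_count" 0 (· + 1))) (pvF g)
      = pvF (r.foldl (fun g q => g.modify q.1 [] (· ++ [q.2])) g) := by
  induction r generalizing g with
  | nil => rfl
  | cons q r ih =>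
    simp only [List.foldl_cons]
    rw [step_main, ih]

theorem foldA_rel (lang : PySem.Dict String String) (l : List (String × Int))
    (b : PySem.Dict String (PySem.Dict String Int)) :
    l.foldl (fun b p =>
        match lang.get? p.1 with
        | none => b
        | some language =>
          if language = "" then b
          else
            ((b.setdefault language (PySem.Dict.ofList [("sloc", (0 : Int)), ("file_count", (0 : Int))])).modify
                language PySem.Dict.empty (fun e => e.modify "sloc" 0 (· + p.2))).modify
              language PySem.Dict.empty (fun e => e.modify "file_count" 0 (· + 1))) b
      = (pvRel lang l).foldl (fun b q =>
          ((b.setdefault q.1 (PySem.Dict.ofList [("sloc", (0 : Int)), ("file_count", (0 : Int))])).modify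
              q.1 PySem.Dict.empty (fun e => e.modify "sloc" 0 (· + q.2))).modify
            q.1 PySem.Dict.empty (fun e => e.modify "file_count" 0 (· + 1))) b := by
  induction l generalizing b with
  | nil => rfl
  | cons p l ih =>
    simp only [List.foldl_cons, pvRel, List.filterMap_cons]
    cases hl : lang.get? p.1 with
    | none => exact ih b
    | some language =>
      by_cases hlang : language = ""
      · simp [hlang]
        exact ih b
      · simp only [if_neg hlang]
        rw [ih]
        rfl

theorem foldB_rel (lang : PySem.Dict String String) (l : List (String × Int))
    (g : PySem.Dict String (List Int)) :
    l.foldl (fun g p =>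
        match lang.get? p.1 with
        | none => g
        | some language =>
          if language = "" then g
          else g.modify language [] (· ++ [p.2])) g
      = (pvRel lang l).foldl (fun g q => g.modify q.1 [] (· ++ [q.2])) g := by
  induction l generalizing g with
  | nil => rfl
  | cons p l ih =>
    simp only [List.foldl_cons, pvRel, List.filterMap_cons]
    cases hl : lang.get? p.1 with
    | none => exact ih g
    | some language =>
      by_cases hlang : language = ""
      · simp [hlang]
        exact ih g
      · simp only [if_neg hlang]
        rw [ih]
        rfl

theorem pvF_items_map (g : PySem.Dict String (List Int)) :
    (pvF g).items.map (fun q => (q.1, q.2.items))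
      = g.items.map (fun q => (q.1, [("sloc", q.2.sum), ("file_count", (q.2.length : Int))])) := by
  cases g with
  | mk L =>
    simp only [pvF, List.map_map]
    apply List.map_congr_left
    intro q _
    rfl

-- ===== VERDICT (by name: the statement is the Claim_ definition above) =====
theorem rebuild_language_breakdown_py_spec : Claim_equal_rebuild_language_breakdown_py := by
  intro per_file_sloc per_file_language _
  unfold Spec_rebuild_language_breakdown_py
  unfold rebuild_language_breakdown_py rebuild_language_breakdown_py_alt
  rw [foldA_rel, foldB_rel]
  have h0 : (PySem.Dict.empty : PySem.Dict String (PySem.Dict String Int)) = pvF PySem.Dict.empty := rfl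
  rw [h0, fold_main]
  exact pvF_items_map _
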